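-- pv_equiv track=rewrite | github.com/drterryhartley/Multipass_LLM | Heathcare_Training.py | embedding_aware_tokenizer
-- ===== SOURCE A (Python) =====
-- vocabulary = {"the", "cat", "sat", "on", "mat", "##ting", "##ted", "run", "walk"}
--
-- def subword_tokenizer(tokens, vocabulary):
--     refined_tokens = []
--     for token in tokens:
--         if token in vocabulary:
--             refined_tokens.append(token)
--         else:
--             refined_tokens.extend(split_into_subwords(token, vocabulary))
--     return refined_tokens
--
-- def split_into_subwords(token, vocabulary):
--     subwords = []
--     i = 0
--     while i < len(token):
--         found_subword = None
--         for j in range(i+1, len(token)+1):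
--             subword_candidate = token[i:j]
--             if subword_candidate in vocabulary:
--                 found_subword = subword_candidate
--         if found_subword:
--             subwords.append(found_subword)
--             i += len(found_subword)
--         else:
--             subwords.append(token[i])
--             i += 1
--     return subwords
--
-- def embedding_aware_tokenizer(tokens, embedding_model):
--     refined_tokens = []
--     for token in tokens:
--         if token in embedding_model:
--             refined_tokens.append(token)
--         else:
--             refined_tokens.extend(subword_tokenizer([token], vocabulary))
--     return refined_tokens
-- ===== SOURCE B (Python) =====
-- vocabulary = {"the", "cat", "sat", "on", "mat", "##ting", "##ted", "run", "walk"}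
--
-- def embedding_aware_tokenizer(tokens, embedding_model):
--     # Flatten per-token piece lists; each piece list is built by repeatedly
--     # scanning the VOCABULARY for the longest word that is a prefix of the rest.
--     return [p for t in tokens for p in _pieces(t, embedding_model)]
--
-- def _pieces(token, embedding_model):
--     if token in embedding_model or token in vocabulary:
--         return [token]
--     pieces = []
--     rest = token
--     while rest:
--         best = ""
--         for w in vocabulary:
--             if rest.startswith(w) and len(w) > len(best):
--                 best = w
--         if not best:
--             best = rest[0]
--         pieces.append(best)
--         rest = rest[len(best):]
--     return pieces
-- ===== Notes on version B (the rewrite author's own statement) =====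
-- stated objective: alternative
-- what changed: Instead of A's forward scan over all end positions of the suffix keeping the last vocabulary hit, B repeatedly scans the small vocabulary itself for the longest word that is a prefix of the remaining suffix, and assembles the result as a flattened list of per-token piece lists instead of a running accumulator.
import Mathlib
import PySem

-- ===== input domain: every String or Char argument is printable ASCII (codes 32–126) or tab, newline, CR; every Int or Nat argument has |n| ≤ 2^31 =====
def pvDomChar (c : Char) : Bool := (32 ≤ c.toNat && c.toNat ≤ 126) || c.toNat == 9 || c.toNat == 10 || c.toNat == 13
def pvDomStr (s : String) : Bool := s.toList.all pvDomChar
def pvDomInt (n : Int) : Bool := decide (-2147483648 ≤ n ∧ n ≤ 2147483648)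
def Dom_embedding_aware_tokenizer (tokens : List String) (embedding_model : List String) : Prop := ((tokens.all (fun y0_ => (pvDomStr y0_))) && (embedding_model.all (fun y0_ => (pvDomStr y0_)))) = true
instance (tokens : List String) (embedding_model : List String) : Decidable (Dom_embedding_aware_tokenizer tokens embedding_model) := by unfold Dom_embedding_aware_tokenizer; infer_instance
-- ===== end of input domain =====

-- B replaces A's position scan (keeping the last vocabulary hit) by a scan of the
-- vocabulary itself for the longest prefix word (objective: alternative algorithm, same result).

-- ===== PORT A =====
def vocabStrs : List String := ["the", "cat", "sat", "on", "mat", "##ting", "##ted", "run", "walk"]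
def vocabC : List (List Char) := vocabStrs.map String.toList

-- inner 'for j in range(i+1, len(token)+1)' over the suffix cs = token[i:], keeping the LAST hit
def findA (cs : List Char) : Option (List Char) :=
  (List.range cs.length).foldl
    (fun acc j => if cs.take (j+1) ∈ vocabC then some (cs.take (j+1)) else acc) none

-- the 'while i < len(token)' loop of split_into_subwords; fuel = remaining length
def splitA : Nat → List Char → List String
  | 0, _ => []
  | _ + 1, [] => []
  | fuel + 1, c :: rest =>
    match findA (c :: rest) with
    | some w => String.ofList w :: splitA fuel ((c :: rest).drop w.length)
    | none => String.ofList [c] :: splitA fuel rest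

def subword_tokenizerA (t : String) : List String :=
  if t ∈ vocabStrs then [t] else splitA t.toList.length t.toList

def embedding_aware_tokenizer (tokens : List String) (embedding_model : List String) : List String :=
  tokens.foldl (fun acc t => if t ∈ embedding_model then acc ++ [t] else acc ++ subword_tokenizerA t) []

-- ===== PORT B =====
-- 'for w in vocabulary: if rest.startswith(w) and len(w) > len(best): best = w'
def bestB (cs : List Char) : List Char :=
  vocabC.foldl (fun best w => if w.isPrefixOf cs ∧ best.length < w.length then w else best) []

-- the 'while rest:' loop of _pieces; fuel = remaining length
def piecesLoop : Nat → List Char → List String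
  | 0, _ => []
  | fuel + 1, cs =>
    if cs.isEmpty then []
    else
      let b := bestB cs
      let p := if b.isEmpty then cs.take 1 else b
      String.ofList p :: piecesLoop fuel (cs.drop p.length)

def piecesB (t : String) (embedding_model : List String) : List String :=
  if t ∈ embedding_model ∨ t ∈ vocabStrs then [t]
  else piecesLoop t.toList.length t.toList

def embedding_aware_tokenizer_alt (tokens : List String) (embedding_model : List String) : List String :=
  tokens.flatMap (fun t => piecesB t embedding_model)

-- ===== PRECONDITION & SPEC =====
def Spec_embedding_aware_tokenizer (tokens : List String) (embedding_model : List String) (out : List String) : Prop := out = embedding_aware_tokenizer_alt tokens embedding_model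
instance (tokens : List String) (embedding_model : List String) (out : List String) : Decidable (Spec_embedding_aware_tokenizer tokens embedding_model out) := by unfold Spec_embedding_aware_tokenizer; infer_instance

-- ===== CLAIM (what is proved, stated in full; the proofs are below) =====
def Claim_equal_embedding_aware_tokenizer : Prop := ∀ (tokens : List String) (embedding_model : List String), Dom_embedding_aware_tokenizer tokens embedding_model → Spec_embedding_aware_tokenizer tokens embedding_model (embedding_aware_tokenizer tokens embedding_model)

-- ===== LEMMAS AND PROOFS =====

theorem vocab_ne_nil : ∀ w ∈ vocabC, w ≠ [] := by decide

-- A-side scan with explicit bound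
def lastHit (cs : List Char) (n : Nat) : Option (List Char) :=
  (List.range n).foldl
    (fun acc j => if cs.take (j+1) ∈ vocabC then some (cs.take (j+1)) else acc) none

theorem lastHit_succ (cs : List Char) (n : Nat) :
    lastHit cs (n+1) = if cs.take (n+1) ∈ vocabC then some (cs.take (n+1)) else lastHit cs n := by
  unfold lastHit
  rw [List.range_succ, List.foldl_append]
  simp

theorem findA_eq_lastHit (cs : List Char) : findA cs = lastHit cs cs.length := rfl

theorem lastHit_none (cs : List Char) (n : Nat) (h : lastHit cs n = none) :
    ∀ j < n, cs.take (j+1) ∉ vocabC := by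
  induction n with
  | zero => omega
  | succ n ih =>
    rw [lastHit_succ] at h
    intro j hj hmem
    by_cases hv : cs.take (n+1) ∈ vocabC
    · rw [if_pos hv] at h; simp at h
    · rw [if_neg hv] at h
      rcases Nat.lt_succ_iff_lt_or_eq.mp hj with hj' | rfl
      · exact ih h j hj' hmem
      · exact hv hmem

theorem lastHit_some (cs : List Char) (n : Nat) (hn : n ≤ cs.length) (w : List Char)
    (h : lastHit cs n = some w) :
    w ∈ vocabC ∧ w <+: cs ∧ ∀ j < n, cs.take (j+1) ∈ vocabC → j + 1 ≤ w.length := by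
  induction n with
  | zero => simp [lastHit] at h
  | succ n ih =>
    rw [lastHit_succ] at h
    by_cases hv : cs.take (n+1) ∈ vocabC
    · rw [if_pos hv] at h
      obtain rfl : cs.take (n+1) = w := Option.some.inj h
      refine ⟨hv, List.take_prefix _ _, ?_⟩
      intro j hj _
      rw [List.length_take]
      omega
    · rw [if_neg hv] at h
      obtain ⟨h1, h2, h3⟩ := ih (by omega) h
      refine ⟨h1, h2, ?_⟩
      intro j hj hmem
      rcases Nat.lt_succ_iff_lt_or_eq.mp hj with hj' | rfl
      · exact h3 j hj' hmem
      · exact absurd hmem hv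

-- B-side fold invariants
theorem bestB_inv (cs : List Char) :
    ∀ (l : List (List Char)) (b : List Char),
      (l.foldl (fun best w => if w.isPrefixOf cs ∧ best.length < w.length then w else best) b = b
        ∨ (l.foldl (fun best w => if w.isPrefixOf cs ∧ best.length < w.length then w else best) b ∈ l
            ∧ l.foldl (fun best w => if w.isPrefixOf cs ∧ best.length < w.length then w else best) b <+: cs)) := by
  intro l
  induction l with
  | nil => intro b; exact Or.inl rfl
  | cons w l ih =>
    intro b
    simp only [List.foldl_cons]
    by_cases hc : w.isPrefixOf cs ∧ b.length < w.length
    · rw [if_pos hc]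
      rcases ih w with h | ⟨h1, h2⟩
      · exact Or.inr ⟨by rw [h]; exact List.mem_cons_self ..,
          by rw [h]; exact List.isPrefixOf_iff_prefix.mp hc.1⟩
      · exact Or.inr ⟨List.mem_cons_of_mem _ h1, h2⟩
    · rw [if_neg hc]
      rcases ih b with h | ⟨h1, h2⟩
      · exact Or.inl h
      · exact Or.inr ⟨List.mem_cons_of_mem _ h1, h2⟩

theorem bestB_max (cs : List Char) :
    ∀ (l : List (List Char)) (b : List Char),
      b.length ≤ (l.foldl (fun best w => if w.isPrefixOf cs ∧ best.length < w.length then w else best) b).length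
      ∧ ∀ w ∈ l, w <+: cs →
          w.length ≤ (l.foldl (fun best w => if w.isPrefixOf cs ∧ best.length < w.length then w else best) b).length := by
  intro l
  induction l with
  | nil => intro b; exact ⟨le_rfl, by simp⟩
  | cons w l ih =>
    intro b
    simp only [List.foldl_cons]
    by_cases hc : w.isPrefixOf cs ∧ b.length < w.length
    · rw [if_pos hc]
      obtain ⟨hb, hall⟩ := ih w
      refine ⟨le_trans (le_of_lt hc.2) hb, ?_⟩
      intro v hv hvp
      rcases List.mem_cons.mp hv with rfl | hv'
      · exact hb
      · exact hall v hv' hvp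
    · rw [if_neg hc]
      obtain ⟨hb, hall⟩ := ih b
      refine ⟨hb, ?_⟩
      intro v hv hvp
      rcases List.mem_cons.mp hv with rfl | hv'
      · -- w is a prefix but not longer than b
        rcases Decidable.not_and_iff_or_not.mp hc with hnp | hnl
        · exact absurd (List.isPrefixOf_iff_prefix.mpr hvp) hnp
        · exact le_trans (by omega) hb
      · exact hall v hv' hvp

theorem bestB_cases (cs : List Char) :
    bestB cs = [] ∨ (bestB cs ∈ vocabC ∧ bestB cs <+: cs) :=
  bestB_inv cs vocabC []

theorem bestB_ge (cs : List Char) : ∀ w ∈ vocabC, w <+: cs → w.length ≤ (bestB cs).length :=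
  (bestB_max cs vocabC []).2

-- the key bridge: A's last-hit scan equals B's longest-vocab-prefix
theorem findA_eq_bestB (cs : List Char) :
    findA cs = if bestB cs = [] then none else some (bestB cs) := by
  rw [findA_eq_lastHit]
  cases hA : lastHit cs cs.length with
  | none =>
    have hnone := lastHit_none cs cs.length hA
    rw [if_pos]
    by_contra hne
    rcases bestB_cases cs with h | ⟨h1, h2⟩
    · exact hne h
    · have hb := List.prefix_iff_eq_take.mp h2
      have hlen : (bestB cs).length ≤ cs.length := h2.length_le
      have hpos : 0 < (bestB cs).length := List.length_pos_iff.mpr (vocab_ne_nil _ h1)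
      exact hnone ((bestB cs).length - 1) (by omega)
        (by rw [show (bestB cs).length - 1 + 1 = (bestB cs).length by omega, ← hb]; exact h1)
  | some w =>
    obtain ⟨hw, hwp, hmax⟩ := lastHit_some cs cs.length le_rfl w hA
    have hwlen : w.length ≤ (bestB cs).length := bestB_ge cs w hw hwp
    have hwpos : 0 < w.length := List.length_pos_iff.mpr (vocab_ne_nil _ hw)
    have hbne : bestB cs ≠ [] := by
      intro h; rw [h] at hwlen; simp only [List.length_nil, Nat.le_zero] at hwlen; omega
    rw [if_neg hbne]
    rcases bestB_cases cs with h | ⟨h1, h2⟩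
    · exact absurd h hbne
    · -- bestB is a vocab prefix, so its length is bounded by w's (A's max)
      have hlen : (bestB cs).length ≤ cs.length := h2.length_le
      have hpos : 0 < (bestB cs).length := List.length_pos_iff.mpr (vocab_ne_nil _ h1)
      have hb := List.prefix_iff_eq_take.mp h2
      have hble : (bestB cs).length ≤ w.length := by
        have := hmax ((bestB cs).length - 1) (by omega)
          (by rw [show (bestB cs).length - 1 + 1 = (bestB cs).length by omega, ← hb]; exact h1)
        omega
      have heq : w.length = (bestB cs).length := le_antisymm hwlen hble
      rw [List.prefix_iff_eq_take.mp hwp, hb, ← heq]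

theorem splitA_eq_piecesLoop (fuel : Nat) (cs : List Char) :
    splitA fuel cs = piecesLoop fuel cs := by
  induction fuel generalizing cs with
  | zero => rfl
  | succ fuel ih =>
    cases cs with
    | nil => rfl
    | cons c rest =>
      rw [splitA, piecesLoop]
      simp only [List.isEmpty_cons, if_neg Bool.false_ne_true]
      rw [findA_eq_bestB]
      by_cases hb : bestB (c :: rest) = []
      · simp only [hb, List.isEmpty_nil]
        simp [List.take, ih]
      · rw [if_neg hb]
        have : (bestB (c :: rest)).isEmpty = false := by
          cases h : bestB (c :: rest) <;> simp_all
        simp only [this, if_neg Bool.false_ne_true, ih]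

theorem foldl_append_flat {α β : Type} (l : List α) (f : α → List β) (acc : List β) :
    l.foldl (fun acc t => acc ++ f t) acc = acc ++ l.flatMap f := by
  induction l generalizing acc with
  | nil => simp
  | cons x l ih => simp [ih]

-- ===== VERDICT (by name: the statement is the Claim_ definition above) =====
theorem embedding_aware_tokenizer_spec : Claim_equal_embedding_aware_tokenizer := by
  intro tokens em _
  show embedding_aware_tokenizer tokens em = embedding_aware_tokenizer_alt tokens em
  unfold embedding_aware_tokenizer embedding_aware_tokenizer_alt
  have hfn : ∀ t : String,
      (if t ∈ em then [t] else subword_tokenizerA t) = piecesB t em := by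
    intro t
    unfold subword_tokenizerA piecesB
    by_cases he : t ∈ em
    · simp [he]
    · by_cases hv : t ∈ vocabStrs <;> simp [he, hv, splitA_eq_piecesLoop]
  calc tokens.foldl (fun acc t => if t ∈ em then acc ++ [t] else acc ++ subword_tokenizerA t) []
      = tokens.foldl (fun acc t => acc ++ piecesB t em) [] := by
        congr 1; funext acc t; rw [← hfn t]; split <;> rfl
    _ = tokens.flatMap (fun t => piecesB t em) := by rw [foldl_append_flat]; rfl
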